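-- pv_equiv track=rewrite | github.com/sauravsingh2111/osint-bot | bot.py | generate_username_based_bio
-- ===== SOURCE A (Python) =====
-- def generate_username_based_bio(username):
--     if any(w in username.lower() for w in ['tech', 'coder', 'dev', 'hack']):
--         return f"💻 Tech Enthusiast | Developer | {username}"
--     elif any(w in username.lower() for w in ['photo', 'pic', 'click']):
--         return f"📸 Photography | Visual Storyteller | {username}"
--     elif any(w in username.lower() for w in ['travel', 'tour']):
--         return f"✈️ Travel Blogger | Exploring the world | {username}"
--     elif any(w in username.lower() for w in ['music', 'song']):
--         return f"🎵 Music | Artist | {username}"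
--     else:
--         return f"✨ {username} | Content Creator | India"
-- ===== SOURCE B (Python) =====
-- _GROUPS = [
--     (("tech", "coder", "dev", "hack"), "\U0001F4BB Tech Enthusiast | Developer | "),
--     (("photo", "pic", "click"), "\U0001F4F8 Photography | Visual Storyteller | "),
--     (("travel", "tour"), "\u2708\ufe0f Travel Blogger | Exploring the world | "),
--     (("music", "song"), "\U0001F3B5 Music | Artist | "),
-- ]
--
-- def generate_username_based_bio(username):
--     # Single left-to-right scan over the lowered string: at each position try to
--     # read off a keyword, keeping the smallest (highest-priority) category seen.
--     lowered = username.lower()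
--     best = len(_GROUPS)
--     for i in range(len(lowered)):
--         for cat, (kws, _tpl) in enumerate(_GROUPS):
--             if cat < best and lowered.startswith(kws, i):
--                 best = cat
--     if best == len(_GROUPS):
--         return f"\u2728 {username} | Content Creator | India"
--     return _GROUPS[best][1] + username
-- ===== Notes on version B (the rewrite author's own statement) =====
-- stated objective: alternative
-- what changed: Instead of A's chain of per-keyword substring membership tests, B makes a single left-to-right scan over the lowered string, at each position trying to read off a keyword via startswith and keeping the smallest (highest-priority) matched category index, then renders that category's template (4 = default).
import Mathlib
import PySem

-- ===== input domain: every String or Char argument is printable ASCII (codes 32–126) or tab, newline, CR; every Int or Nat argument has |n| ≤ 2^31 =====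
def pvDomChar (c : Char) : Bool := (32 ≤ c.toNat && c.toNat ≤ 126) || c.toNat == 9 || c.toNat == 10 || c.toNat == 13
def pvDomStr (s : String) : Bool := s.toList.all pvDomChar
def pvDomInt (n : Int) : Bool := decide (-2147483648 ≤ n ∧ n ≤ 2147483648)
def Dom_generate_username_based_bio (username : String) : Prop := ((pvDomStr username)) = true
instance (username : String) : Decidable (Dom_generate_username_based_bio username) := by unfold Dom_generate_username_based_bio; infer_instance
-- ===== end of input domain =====

-- B replaces A's chain of per-keyword substring tests by a single left-to-right scan
-- over the lowered string that, at each position, tries to read off a keyword and keeps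
-- the smallest (highest-priority) category index seen (objective: alternative; same cost).

-- ===== PORT A =====
def generate_username_based_bio (username : String) : String :=
  if ["tech", "coder", "dev", "hack"].any
      (fun w => PySem.Str.isIn w (PySem.Str.lower username)) then
    "💻 Tech Enthusiast | Developer | " ++ username
  else if ["photo", "pic", "click"].any
      (fun w => PySem.Str.isIn w (PySem.Str.lower username)) then
    "📸 Photography | Visual Storyteller | " ++ username
  else if ["travel", "tour"].any
      (fun w => PySem.Str.isIn w (PySem.Str.lower username)) then
    "✈️ Travel Blogger | Exploring the world | " ++ username
  else if ["music", "song"].any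
      (fun w => PySem.Str.isIn w (PySem.Str.lower username)) then
    "🎵 Music | Artist | " ++ username
  else
    "✨ " ++ username ++ " | Content Creator | India"

-- ===== PORT B =====
-- Each template in Source B ends with the username, so _GROUPS[best][1] + username is prefix ++ username.
def pvGroups : List (List String × String) :=
  [ (["tech", "coder", "dev", "hack"], "💻 Tech Enthusiast | Developer | "),
    (["photo", "pic", "click"], "📸 Photography | Visual Storyteller | "),
    (["travel", "tour"], "✈️ Travel Blogger | Exploring the world | "),
    (["music", "song"], "🎵 Music | Artist | ") ]

-- inner loop body: 'if cat < best and lowered.startswith(kws, i): best = cat';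
-- Python's tuple startswith(kws, i) on 0 ≤ i ≤ len is: some keyword is a prefix of lowered[i:]
def pvStep (t : List Char) (b : Int) (q : Int × (List String × String)) : Int :=
  if q.1 < b && q.2.1.any (fun kw => kw.toList.isPrefixOf t) then q.1 else b

-- 'for cat, (kws, _tpl) in enumerate(_GROUPS): …'
def pvScanPos (t : List Char) (b : Int) : Int :=
  (PySem.List.enumerate pvGroups).foldl (pvStep t) b

-- 'best = len(_GROUPS); for i in range(len(lowered)): …' — i ranges over 0 ≤ i < len,
-- so List.range and List.drop i are exact here.
def pvBest (t : List Char) : Int :=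
  (List.range t.length).foldl (fun b i => pvScanPos (t.drop i) b) 4

def generate_username_based_bio_alt (username : String) : String :=
  let best := pvBest (PySem.Str.lower username).toList
  if best == 4 then "✨ " ++ username ++ " | Content Creator | India"
  else ((PySem.List.pyGet? pvGroups best).map (fun g => g.2)).getD "" ++ username

-- ===== PRECONDITION & SPEC =====
def Spec_generate_username_based_bio (username : String) (out : String) : Prop := out = generate_username_based_bio_alt username
instance (username : String) (out : String) : Decidable (Spec_generate_username_based_bio username out) := by unfold Spec_generate_username_based_bio; infer_instance

-- ===== CLAIM (what is proved, stated in full; the proofs are below) =====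
def Claim_equal_generate_username_based_bio : Prop := ∀ (username : String), Dom_generate_username_based_bio username → Spec_generate_username_based_bio username (generate_username_based_bio username)

-- ===== LEMMAS AND PROOFS =====

-- generic facts about folds whose step never increases the accumulator
theorem pv_fold_le {ι : Type} (f : Int → ι → Int) (hf : ∀ b x, f b x ≤ b) :
    ∀ (l : List ι) (b : Int), l.foldl f b ≤ b := by
  intro l
  induction l with
  | nil => intro b; simp
  | cons x l ih =>
      intro b
      simpa using le_trans (ih (f b x)) (hf b x)

theorem pv_fold_le_mem {ι : Type} (f : Int → ι → Int) (hf : ∀ b x, f b x ≤ b)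
    (c : Int) (i : ι) (hc : ∀ b, f b i ≤ c) :
    ∀ (l : List ι), i ∈ l → ∀ b, l.foldl f b ≤ c := by
  intro l
  induction l with
  | nil => intro h; cases h
  | cons x l ih =>
      intro hi b
      rcases List.mem_cons.mp hi with h | h
      · subst h
        simpa using le_trans (pv_fold_le f hf l (f b i)) (hc b)
      · simpa using ih h (f b x)

theorem pv_fold_eq_or {ι : Type} (f : Int → ι → Int) (R : ι → Int → Prop)
    (hf : ∀ b x, f b x = b ∨ R x (f b x)) :
    ∀ (l : List ι) (b : Int), l.foldl f b = b ∨ ∃ x ∈ l, R x (l.foldl f b) := by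
  intro l
  induction l with
  | nil => intro b; left; rfl
  | cons x l ih =>
      intro b
      rcases ih (f b x) with h | ⟨y, hy, hR⟩
      · rcases hf b x with h' | h'
        · left; simpa [h'] using h
        · right
          exact ⟨x, List.mem_cons_self, by simpa [h] using h'⟩
      · right
        exact ⟨y, List.mem_cons_of_mem _ hy, by simpa using hR⟩

theorem pvStep_le (t : List Char) (b : Int) (q : Int × (List String × String)) :
    pvStep t b q ≤ b := by
  unfold pvStep
  split
  · rename_i h
    simp only [Bool.and_eq_true, decide_eq_true_eq] at h
    omega
  · exact le_refl b

theorem pvScanPos_le (t : List Char) (b : Int) : pvScanPos t b ≤ b :=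
  pv_fold_le _ (pvStep_le t) _ b

-- if some group element q matches at position i < |t|, the final best is ≤ q.1
theorem pvBest_le_of (t : List Char) (i : Nat) (hi : i ∈ List.range t.length)
    (q : Int × (List String × String)) (hq : q ∈ PySem.List.enumerate pvGroups)
    (hm : q.2.1.any (fun kw => kw.toList.isPrefixOf (t.drop i)) = true) :
    pvBest t ≤ q.1 := by
  have hstep : ∀ b, pvStep (t.drop i) b q ≤ q.1 := by
    intro b
    unfold pvStep
    simp only [hm, Bool.and_true]
    split <;> rename_i h <;> simp_all
  have hinner : ∀ b, pvScanPos (t.drop i) b ≤ q.1 :=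
    pv_fold_le_mem _ (pvStep_le _) q.1 q hstep _ hq
  exact pv_fold_le_mem _ (fun b j => pvScanPos_le (t.drop j) b) q.1 i hinner _ hi 4

theorem pvBest_attain (t : List Char) :
    pvBest t = 4 ∨ ∃ i ∈ List.range t.length, ∃ q ∈ PySem.List.enumerate pvGroups,
      (q.2.1.any (fun kw => kw.toList.isPrefixOf (t.drop i)) = true) ∧ pvBest t = q.1 := by
  have hstep : ∀ t' b (q : Int × (List String × String)),
      pvStep t' b q = b ∨ ((q.2.1.any (fun kw => kw.toList.isPrefixOf t') = true) ∧ pvStep t' b q = q.1) := by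
    intro t' b q
    unfold pvStep
    split
    · rename_i h
      simp only [Bool.and_eq_true] at h
      exact Or.inr ⟨h.2, rfl⟩
    · exact Or.inl rfl
  have hinner : ∀ (i : Nat) b, pvScanPos (t.drop i) b = b ∨
      ∃ q ∈ PySem.List.enumerate pvGroups,
        (q.2.1.any (fun kw => kw.toList.isPrefixOf (t.drop i)) = true) ∧ pvScanPos (t.drop i) b = q.1 := by
    intro i b
    exact pv_fold_eq_or (pvStep (t.drop i))
      (fun q v => (q.2.1.any (fun kw => kw.toList.isPrefixOf (t.drop i)) = true) ∧ v = q.1)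
      (hstep (t.drop i)) _ b
  exact pv_fold_eq_or (fun b i => pvScanPos (t.drop i) b)
    (fun i v => ∃ q ∈ PySem.List.enumerate pvGroups,
      (q.2.1.any (fun kw => kw.toList.isPrefixOf (t.drop i)) = true) ∧ v = q.1)
    (fun b i => hinner i b) _ 4

-- 'kw occurs somewhere in lowered' ↔ 'kw can be read off at some scanned position'
theorem pv_occ_iff (kws : List String) (hk : ∀ w ∈ kws, w.toList ≠ []) (lowered : String) :
    (kws.any (fun w => PySem.Str.isIn w lowered) = true) ↔
    ∃ i ∈ List.range lowered.toList.length,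
      kws.any (fun kw => kw.toList.isPrefixOf (lowered.toList.drop i)) = true := by
  simp only [List.any_eq_true, List.mem_range]
  constructor
  · rintro ⟨w, hw, hin⟩
    have hinf : w.toList <:+: lowered.toList := (PySem.Str.isIn_iff_infix w lowered).mp hin
    have : PySem.Chars.isIn w.toList lowered.toList = true :=
      (PySem.Chars.isIn_iff_infix _ _).mpr hinf
    obtain ⟨j, hj⟩ := (PySem.Chars.exists_prefix_drop_iff_isIn w.toList lowered.toList).mpr this
    have hlen : w.toList.length ≤ (lowered.toList.drop j).length := hj.length_le
    have hne : w.toList ≠ [] := hk w hw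
    have hwpos : 0 < w.toList.length := List.length_pos_of_ne_nil hne
    have hjlt : j < lowered.toList.length := by
      simp only [List.length_drop] at hlen; omega
    exact ⟨j, hjlt, w, hw, List.isPrefixOf_iff_prefix.mpr hj⟩
  · rintro ⟨i, _, w, hw, hp⟩
    refine ⟨w, hw, ?_⟩
    have hpre : w.toList <+: lowered.toList.drop i := List.isPrefixOf_iff_prefix.mp hp
    have : PySem.Chars.isIn w.toList lowered.toList = true :=
      (PySem.Chars.exists_prefix_drop_iff_isIn w.toList lowered.toList).mp ⟨i, hpre⟩
    exact (PySem.Str.isIn_iff_infix w lowered).mpr ((PySem.Chars.isIn_iff_infix _ _).mp this)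

-- the scan computes exactly the index of A's first matching branch (4 = none)
theorem pvBest_eq (lowered : String) :
    pvBest lowered.toList =
      (if ["tech", "coder", "dev", "hack"].any (fun w => PySem.Str.isIn w lowered) then 0
       else if ["photo", "pic", "click"].any (fun w => PySem.Str.isIn w lowered) then 1
       else if ["travel", "tour"].any (fun w => PySem.Str.isIn w lowered) then 2
       else if ["music", "song"].any (fun w => PySem.Str.isIn w lowered) then 3
       else 4) := by
  have hk0 : ∀ w ∈ ["tech", "coder", "dev", "hack"], w.toList ≠ [] := by decide
  have hk1 : ∀ w ∈ ["photo", "pic", "click"], w.toList ≠ [] := by decide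
  have hk2 : ∀ w ∈ ["travel", "tour"], w.toList ≠ [] := by decide
  have hk3 : ∀ w ∈ ["music", "song"], w.toList ≠ [] := by decide
  have hle : ∀ (c : Int) (kws : List String) (tpl : String),
      ((c, (kws, tpl)) ∈ PySem.List.enumerate pvGroups) →
      (∀ w ∈ kws, w.toList ≠ []) →
      (kws.any (fun w => PySem.Str.isIn w lowered) = true) → pvBest lowered.toList ≤ c := by
    intro c kws tpl hqmem hk hocc
    obtain ⟨i, hi, hm⟩ := (pv_occ_iff kws hk lowered).mp hocc
    exact pvBest_le_of _ i hi (c, (kws, tpl)) hqmem hm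
  have hm0 : ((0 : Int), (["tech", "coder", "dev", "hack"], "💻 Tech Enthusiast | Developer | ")) ∈ PySem.List.enumerate pvGroups := by
    simp [pvGroups, PySem.List.enumerate_cons, PySem.List.enumerate_nil]
  have hm1 : ((1 : Int), (["photo", "pic", "click"], "📸 Photography | Visual Storyteller | ")) ∈ PySem.List.enumerate pvGroups := by
    simp [pvGroups, PySem.List.enumerate_cons, PySem.List.enumerate_nil]
  have hm2 : ((2 : Int), (["travel", "tour"], "✈️ Travel Blogger | Exploring the world | ")) ∈ PySem.List.enumerate pvGroups := by
    simp [pvGroups, PySem.List.enumerate_cons, PySem.List.enumerate_nil]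
  have hm3 : ((3 : Int), (["music", "song"], "🎵 Music | Artist | ")) ∈ PySem.List.enumerate pvGroups := by
    simp [pvGroups, PySem.List.enumerate_cons, PySem.List.enumerate_nil]
  have hcases : pvBest lowered.toList = 4 ∨
      (pvBest lowered.toList = 0 ∧ (["tech", "coder", "dev", "hack"].any (fun w => PySem.Str.isIn w lowered)) = true) ∨
      (pvBest lowered.toList = 1 ∧ (["photo", "pic", "click"].any (fun w => PySem.Str.isIn w lowered)) = true) ∨
      (pvBest lowered.toList = 2 ∧ (["travel", "tour"].any (fun w => PySem.Str.isIn w lowered)) = true) ∨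
      (pvBest lowered.toList = 3 ∧ (["music", "song"].any (fun w => PySem.Str.isIn w lowered)) = true) := by
    rcases pvBest_attain lowered.toList with h | ⟨i, hi, q, hq, hm, hb⟩
    · exact Or.inl h
    · simp only [pvGroups, PySem.List.enumerate_cons, PySem.List.enumerate_nil,
        List.mem_cons, List.not_mem_nil, or_false] at hq
      have hocc : ∀ (kws : List String), (∀ w ∈ kws, w.toList ≠ []) →
          kws.any (fun kw => kw.toList.isPrefixOf (lowered.toList.drop i)) = true →
          (kws.any (fun w => PySem.Str.isIn w lowered)) = true := by
        intro kws hk hmm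
        exact (pv_occ_iff kws hk lowered).mpr ⟨i, hi, hmm⟩
      rcases hq with rfl | rfl | rfl | rfl
      · exact Or.inr (Or.inl ⟨by simpa using hb, hocc _ hk0 (by simpa using hm)⟩)
      · exact Or.inr (Or.inr (Or.inl ⟨by simpa using hb, hocc _ hk1 (by simpa using hm)⟩))
      · exact Or.inr (Or.inr (Or.inr (Or.inl ⟨by simpa using hb, hocc _ hk2 (by simpa using hm)⟩)))
      · exact Or.inr (Or.inr (Or.inr (Or.inr ⟨by simpa using hb, hocc _ hk3 (by simpa using hm)⟩)))
  split_ifs with h0 h1 h2 h3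
  · have hl := hle 0 _ _ hm0 hk0 h0
    rcases hcases with h | ⟨h, ho⟩ | ⟨h, ho⟩ | ⟨h, ho⟩ | ⟨h, ho⟩ <;> omega
  · have hl := hle 1 _ _ hm1 hk1 h1
    rcases hcases with h | ⟨h, ho⟩ | ⟨h, ho⟩ | ⟨h, ho⟩ | ⟨h, ho⟩ <;>
      first | omega | exact absurd ho h0
  · have hl := hle 2 _ _ hm2 hk2 h2
    rcases hcases with h | ⟨h, ho⟩ | ⟨h, ho⟩ | ⟨h, ho⟩ | ⟨h, ho⟩ <;>
      first | omega | exact absurd ho h0 | exact absurd ho h1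
  · have hl := hle 3 _ _ hm3 hk3 h3
    rcases hcases with h | ⟨h, ho⟩ | ⟨h, ho⟩ | ⟨h, ho⟩ | ⟨h, ho⟩ <;>
      first | omega | exact absurd ho h0 | exact absurd ho h1 | exact absurd ho h2
  · rcases hcases with h | ⟨h, ho⟩ | ⟨h, ho⟩ | ⟨h, ho⟩ | ⟨h, ho⟩ <;>
      first | omega | exact absurd ho h0 | exact absurd ho h1 | exact absurd ho h2 | exact absurd ho h3

-- ===== VERDICT (by name: the statement is the Claim_ definition above) =====
theorem generate_username_based_bio_spec : Claim_equal_generate_username_based_bio := by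
  intro username _
  unfold Spec_generate_username_based_bio generate_username_based_bio generate_username_based_bio_alt
  rw [pvBest_eq]
  split_ifs <;> simp [pvGroups, PySem.List.pyGet?, PySem.List.pyIdx?]
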